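-- pv_equiv track=rewrite | github.com/aws-samples/amazon-omics-tutorials | utils/scripts/compute_pricing.py | get_instance
-- ===== SOURCE A (Python) =====
-- def get_instance(cpus, mem):
--     """Return smallest matching instance type (str)"""
--     sizes = {
--         "": 2,
--         "x": 4,
--         "2x": 8,
--         "4x": 16,
--         "8x": 32,
--         "12x": 48,
--         "16x": 64,
--         "24x": 96,
--     }
--     families = {"c": 2, "m": 4, "r": 8}
--     for size in sorted(sizes, key=lambda x: sizes[x]):
--         ccount = sizes[size]
--         if ccount < cpus:
--             continue
--         for fam in sorted(families, key=lambda x: families[x]):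
--             mcount = ccount * families[fam]
--             if mcount < mem:
--                 continue
--             return f"omics.{fam}.{size}large"
--     return ""
-- ===== SOURCE B (Python) =====
-- def get_instance(cpus, mem):
--     """Return smallest matching instance type (str)"""
--     size_names = {2: "", 4: "x", 8: "2x", 16: "4x", 32: "8x", 48: "12x", 64: "16x", 96: "24x"}
--     # cores needed: enough for the cpu demand, and enough that even the
--     # highest-memory family (r: 8 GiB per core) covers mem -> ceil(mem / 8)
--     need = max(cpus, -(-mem // 8))
--     hit = next(((c, name) for c, name in size_names.items() if c >= need), None)
--     if hit is None:
--         return ""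
--     ccount, size = hit
--     fam = "c" if 2 * ccount >= mem else "m" if 4 * ccount >= mem else "r"
--     return f"omics.{fam}.{size}large"
-- ===== Notes on version B (the rewrite author's own statement) =====
-- stated objective: alternative
-- what changed: A's nested feasibility search (for each size, try each family and test ccount*fmult >= mem) is replaced by arithmetic: compute the required core count need = max(cpus, ceil(mem/8)) by ceiling division, find the single smallest size with ccount >= need, and pick the family with two comparisons - the inner loop and the per-call dict sorting disappear.
import Mathlib
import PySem

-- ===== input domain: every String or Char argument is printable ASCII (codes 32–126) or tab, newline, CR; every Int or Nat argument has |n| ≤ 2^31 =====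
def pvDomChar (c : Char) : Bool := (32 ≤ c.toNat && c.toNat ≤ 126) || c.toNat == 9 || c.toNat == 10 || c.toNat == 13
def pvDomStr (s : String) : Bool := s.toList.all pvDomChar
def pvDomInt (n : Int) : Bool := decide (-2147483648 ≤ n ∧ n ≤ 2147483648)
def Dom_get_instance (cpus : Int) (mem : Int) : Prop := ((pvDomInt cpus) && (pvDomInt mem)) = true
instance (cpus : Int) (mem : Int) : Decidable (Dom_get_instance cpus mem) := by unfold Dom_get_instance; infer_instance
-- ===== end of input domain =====

-- B replaces A's nested feasibility search by arithmetic: the required core count is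
-- max(cpus, ceil(mem/8)); one threshold scan picks the size, two comparisons pick the family
-- (objective: alternative).

-- ===== PORT A =====
def pvSizesA : PySem.Dict String Int :=
  PySem.Dict.ofList [("", 2), ("x", 4), ("2x", 8), ("4x", 16), ("8x", 32), ("12x", 48), ("16x", 64), ("24x", 96)]
def pvFamiliesA : PySem.Dict String Int := PySem.Dict.ofList [("c", 2), ("m", 4), ("r", 8)]

-- inner loop 'for fam in sorted(families, key=…)'; getD is exact here since every iterated key is in the dict
def pvFamLoop (mem ccount : Int) (size : String) : List String → Option String
  | [] => none
  | fam :: rest =>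
    let mcount := ccount * pvFamiliesA.getD fam 0
    if mcount < mem then pvFamLoop mem ccount size rest
    else some ("omics." ++ fam ++ "." ++ size ++ "large")

-- outer loop 'for size in sorted(sizes, key=…)'; 'return' inside the inner loop = the 'some' branch
def pvSizeLoop (cpus mem : Int) : List String → Option String
  | [] => none
  | size :: rest =>
    let ccount := pvSizesA.getD size 0
    if ccount < cpus then pvSizeLoop cpus mem rest
    else
      match pvFamLoop mem ccount size (PySem.List.sorted pvFamiliesA.keys (fun x => pvFamiliesA.getD x 0) false) with
      | some s => some s
      | none => pvSizeLoop cpus mem rest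

def get_instance (cpus : Int) (mem : Int) : String :=
  match pvSizeLoop cpus mem (PySem.List.sorted pvSizesA.keys (fun x => pvSizesA.getD x 0) false) with
  | some s => s
  | none => ""

-- ===== PORT B =====
-- size_names = {2: "", 4: "x", …} iterated in insertion order
def pvSizeNames : List (Int × String) :=
  [(2, ""), (4, "x"), (8, "2x"), (16, "4x"), (32, "8x"), (48, "12x"), (64, "16x"), (96, "24x")]

-- need = max(cpus, -(-mem // 8)); hit = next(((c, name) …, None); fam by two comparisons
def get_instance_alt (cpus : Int) (mem : Int) : String :=
  let need := max cpus (-(PySem.Int.floordiv (-mem) 8))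
  match pvSizeNames.find? (fun p => decide (p.1 ≥ need)) with
  | none => ""
  | some p =>
    let fam := if 2 * p.1 ≥ mem then "c" else if 4 * p.1 ≥ mem then "m" else "r"
    "omics." ++ fam ++ "." ++ p.2 ++ "large"

-- ===== PRECONDITION & SPEC =====
def Spec_get_instance (cpus : Int) (mem : Int) (out : String) : Prop := out = get_instance_alt cpus mem
instance (cpus : Int) (mem : Int) (out : String) : Decidable (Spec_get_instance cpus mem out) := by unfold Spec_get_instance; infer_instance

-- ===== CLAIM =====
def Claim_equal_get_instance : Prop := ∀ (cpus : Int) (mem : Int), Dom_get_instance cpus mem → Spec_get_instance cpus mem (get_instance cpus mem)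

-- ===== LEMMAS AND PROOFS =====
-- B's family choice
def pvFamOf (mem c : Int) : String :=
  if 2 * c ≥ mem then "c" else if 4 * c ≥ mem then "m" else "r"

-- 'c ≥ need' is exactly 'c ≥ cpus and 8c ≥ mem'
theorem need_iff (cpus mem c : Int) :
    (c ≥ max cpus (-(PySem.Int.floordiv (-mem) 8))) ↔ (cpus ≤ c ∧ mem ≤ 8 * c) := by
  rw [ge_iff_le, max_le_iff, PySem.Int.floordiv_eq_ediv_of_pos (by omega : (0:Int) < 8)]
  omega

-- A's inner family loop, for a nonneg core count, succeeds iff 8c ≥ mem and returns pvFamOf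
theorem fam_char (mem c : Int) (size : String) (hc : 0 ≤ c) :
    pvFamLoop mem c size ["c", "m", "r"] =
      if mem ≤ 8 * c then some ("omics." ++ pvFamOf mem c ++ "." ++ size ++ "large") else none := by
  have f1 : pvFamiliesA.getD "c" 0 = 2 := by decide
  have f2 : pvFamiliesA.getD "m" 0 = 4 := by decide
  have f3 : pvFamiliesA.getD "r" 0 = 8 := by decide
  simp only [pvFamLoop, pvFamOf, f1, f2, f3]
  split_ifs <;> first | rfl | omega

-- A's outer loop over any size list equals B's single threshold scan of the paired list
theorem loop_eq (cpus mem : Int) (szs : List String)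
    (h : ∀ s ∈ szs, 0 ≤ pvSizesA.getD s 0) :
    pvSizeLoop cpus mem szs =
      ((szs.map (fun s => (pvSizesA.getD s 0, s))).find?
          (fun p => decide (p.1 ≥ max cpus (-(PySem.Int.floordiv (-mem) 8))))).map
        (fun p => "omics." ++ pvFamOf mem p.1 ++ "." ++ p.2 ++ "large") := by
  induction szs with
  | nil => rfl
  | cons size rest ih =>
    have hc0 : 0 ≤ pvSizesA.getD size 0 := h size (List.mem_cons_self)
    have ih' := ih (fun s hs => h s (List.mem_cons_of_mem _ hs))
    have hfams : PySem.List.sorted pvFamiliesA.keys (fun x => pvFamiliesA.getD x 0) false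
        = ["c", "m", "r"] := by decide
    simp only [List.map_cons]
    by_cases hp : (pvSizesA.getD size 0 ≥ max cpus (-(PySem.Int.floordiv (-mem) 8)))
    · have ⟨h1, h2⟩ := (need_iff cpus mem _).mp hp
      rw [pvSizeLoop, if_neg (by omega), hfams, fam_char mem _ size hc0, if_pos h2]
      simp only [List.find?_cons, decide_eq_true hp, Option.map_some]
    · have hno := (need_iff cpus mem _).not.mp hp
      simp only [List.find?_cons, decide_eq_false hp]
      by_cases hcpu : pvSizesA.getD size 0 < cpus
      · rw [pvSizeLoop, if_pos hcpu, ih']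
      · have hm : ¬ mem ≤ 8 * pvSizesA.getD size 0 := by omega
        rw [pvSizeLoop, if_neg hcpu, hfams, fam_char mem _ size hc0, if_neg hm, ih']

theorem get_instance_eq_alt (cpus mem : Int) : get_instance cpus mem = get_instance_alt cpus mem := by
  have hs : PySem.List.sorted pvSizesA.keys (fun x => pvSizesA.getD x 0) false
      = ["", "x", "2x", "4x", "8x", "12x", "16x", "24x"] := by decide
  have hpairs : ["", "x", "2x", "4x", "8x", "12x", "16x", "24x"].map
      (fun s => (pvSizesA.getD s 0, s)) = pvSizeNames := by decide
  have hnn : ∀ s ∈ ["", "x", "2x", "4x", "8x", "12x", "16x", "24x"], 0 ≤ pvSizesA.getD s 0 := by decide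
  rw [get_instance, hs, loop_eq cpus mem _ hnn, hpairs, get_instance_alt]
  cases pvSizeNames.find? (fun p => decide (p.1 ≥ max cpus (-(PySem.Int.floordiv (-mem) 8)))) with
  | none => rfl
  | some p => simp [pvFamOf]

-- ===== VERDICT =====
theorem get_instance_spec : Claim_equal_get_instance := by
  intro cpus mem _
  unfold Spec_get_instance
  exact get_instance_eq_alt cpus mem
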